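-- pv_equiv track=rewrite | github.com/TomWildenhain/pptcc | pptutils.py | int_to_dword
-- ===== SOURCE A (Python) =====
-- def int_to_dword(x):
--     if x < 0:
--         x += 2**32
--     res = ''
--     for i in range(32):
--         if x % 2 == 1:
--             res = '1' + res
--         else:
--             res = '0' + res
--         x = x // 2
--     return res[:16], res[16:]
-- ===== SOURCE B (Python) =====
-- def int_to_dword(x):
--     n = x % 2**32
--     return format(n // 2**16, '016b'), format(n % 2**16, '016b')
-- ===== Notes on version B (the rewrite author's own statement) =====
-- stated objective: simpler
-- what changed: Replaces the per-bit build loop plus string slicing by closed-form arithmetic: reduce x to its low double-word, split it into the high and low halves with floor division and remainder, and format each half directly.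
import Mathlib
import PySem

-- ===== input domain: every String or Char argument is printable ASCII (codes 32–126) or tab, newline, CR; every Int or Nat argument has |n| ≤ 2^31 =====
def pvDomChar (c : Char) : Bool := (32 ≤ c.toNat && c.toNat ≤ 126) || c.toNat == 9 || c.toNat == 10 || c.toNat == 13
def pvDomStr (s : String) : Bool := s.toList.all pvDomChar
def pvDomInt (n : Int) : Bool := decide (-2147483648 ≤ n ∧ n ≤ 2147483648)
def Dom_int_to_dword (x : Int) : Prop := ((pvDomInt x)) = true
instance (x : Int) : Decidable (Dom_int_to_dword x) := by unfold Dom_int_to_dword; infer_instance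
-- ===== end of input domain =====

-- B replaces A's 32-step bit-building loop + slicing by closed-form arithmetic: split x mod 2^32 into two 16-bit halves and format each.


-- ===== PORT A =====
-- str concatenation/slicing is ported on List Char (exact); res[:16]/res[16:] via PySem.List.slice
def int_to_dword (x : Int) : String × String :=
  let x1 := if x < 0 then x + 2^32 else x
  let st := (PySem.List.pyRange 0 32 1).foldl
    (fun (st : List Char × Int) _ =>
      (if PySem.Int.mod st.2 2 == 1 then '1' :: st.1 else '0' :: st.1,
       PySem.Int.floordiv st.2 2))
    ([], x1)
  (String.ofList (PySem.List.slice st.1 none (some 16)),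
   String.ofList (PySem.List.slice st.1 (some 16) none))

-- ===== PORT B =====
-- binary digits of m, MSB first (empty for 0); helper for format(·, 'b')
def binDigits : Nat → List Char
  | 0 => []
  | m+1 => binDigits ((m+1)/2) ++ [if (m+1) % 2 == 1 then '1' else '0']
decreasing_by omega

-- port of format(h, '016b'); exact for 0 ≤ h, the only values B passes to it
def fmt016b (h : Int) : String :=
  let digs := if h == 0 then ['0'] else binDigits h.toNat
  String.ofList (List.replicate (16 - digs.length) '0' ++ digs)

def int_to_dword_alt (x : Int) : String × String :=
  let n := PySem.Int.mod x (2^32)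
  (fmt016b (PySem.Int.floordiv n (2^16)), fmt016b (PySem.Int.mod n (2^16)))

-- ===== PRECONDITION & SPEC =====
def Spec_int_to_dword (x : Int) (out : String × String) : Prop := out = int_to_dword_alt x
instance (x : Int) (out : String × String) : Decidable (Spec_int_to_dword x out) := by unfold Spec_int_to_dword; infer_instance

-- ===== CLAIM (what is proved, stated in full; the proofs are below) =====
def Claim_equal_int_to_dword : Prop := ∀ (x : Int), Dom_int_to_dword x → Spec_int_to_dword x (int_to_dword x)

-- ===== LEMMAS AND PROOFS =====

-- the k low bits of m, MSB first (reference form both ports are reduced to)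
def gBits : Nat → Nat → List Char
  | 0, _ => []
  | k+1, m => gBits k (m/2) ++ [if m % 2 == 1 then '1' else '0']

lemma gBits_length (k m : Nat) : (gBits k m).length = k := by
  induction k generalizing m with
  | zero => rfl
  | succ k ih => simp [gBits, ih]

lemma gBits_zero (k : Nat) : gBits k 0 = List.replicate k '0' := by
  induction k with
  | zero => rfl
  | succ k ih => simp [gBits, ih, List.replicate_succ']

-- A's loop computes gBits
lemma loopA (k : Nat) (a : Int) (m : Nat) (r : List Char) :
    (PySem.List.pyRange a (a + k) 1).foldl
      (fun (st : List Char × Int) _ =>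
        (if PySem.Int.mod st.2 2 == 1 then '1' :: st.1 else '0' :: st.1,
         PySem.Int.floordiv st.2 2))
      (r, (m : Int))
    = (gBits k m ++ r, ((m / 2^k : Nat) : Int)) := by
  induction k generalizing a m r with
  | zero => simp [PySem.List.pyRange_one_eq_nil (le_refl a), gBits]
  | succ k ih =>
    rw [show (((k+1 : Nat)) : Int) = (k : Int) + 1 from by push_cast; ring]
    rw [PySem.List.pyRange_one_cons (by omega : a < a + ((k:Int)+1))]
    have hrange : a + ((k : Int)+1) = (a+1) + k := by ring
    rw [hrange, List.foldl_cons]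
    have hmod : PySem.Int.mod (m : Int) 2 = ((m % 2 : Nat) : Int) := by
      exact_mod_cast PySem.Int.mod_natCast m 2
    have hdiv : PySem.Int.floordiv (m : Int) 2 = ((m / 2 : Nat) : Int) := by
      exact_mod_cast PySem.Int.floordiv_natCast m 2
    simp only [hmod, hdiv]
    have hbit : (((m % 2 : Nat) : Int) == 1) = (m % 2 == 1) := by
      rcases Nat.mod_two_eq_zero_or_one m with h | h <;> simp [h]
    rw [hbit, ih (a+1) (m/2)]
    have : m / 2 / 2^k = m / 2^(k+1) := by
      rw [Nat.div_div_eq_div_mul, ← pow_succ']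
    rw [this]
    have hfst : gBits k (m/2) ++ (if (m % 2 == 1) = true then '1' :: r else '0' :: r)
        = gBits (k+1) m ++ r := by
      rcases Nat.mod_two_eq_zero_or_one m with h | h <;> simp [gBits, h]
    rw [hfst]

-- splitting the bit window
lemma gBits_add (a b m : Nat) : gBits (a + b) m = gBits a (m / 2^b) ++ gBits b (m % 2^b) := by
  induction b generalizing m with
  | zero => simp [gBits]
  | succ b ih =>
    have h1 : m / 2 / 2^b = m / 2^(b+1) := by rw [Nat.div_div_eq_div_mul, ← pow_succ']
    have h2 : m % 2^(b+1) / 2 = m / 2 % 2^b := by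
      have : (2:Nat)^(b+1) = 2 * 2^b := by ring
      rw [this, Nat.mod_mul_right_div_self]
    have h3 : m % 2^(b+1) % 2 = m % 2 := by
      exact Nat.mod_mod_of_dvd m ⟨2^b, by ring⟩
    have : a + (b+1) = (a + b) + 1 := by omega
    rw [this]
    show gBits (a+b) (m/2) ++ _ = _
    rw [ih (m/2), h1]
    show _ = gBits a (m / 2^(b+1)) ++ (gBits b (m % 2^(b+1) / 2) ++ _)
    rw [h2, h3, List.append_assoc]

lemma binDigits_pos (h : Nat) (hp : 0 < h) :
    binDigits h = binDigits (h/2) ++ [if h % 2 == 1 then '1' else '0'] := by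
  cases h with
  | zero => omega
  | succ m => rw [binDigits]

-- format's zero-padded digits agree with the k-bit window
lemma gBits_eq_pad (k h : Nat) (hh : h < 2^k) :
    gBits k h = List.replicate (k - (binDigits h).length) '0' ++ binDigits h := by
  induction k generalizing h with
  | zero =>
    have : h = 0 := by omega
    simp [this, gBits, binDigits]
  | succ k ih =>
    by_cases h0 : h = 0
    · simp [h0, gBits_zero, binDigits]
    · have hlt : h / 2 < 2^k := by
        have h2 : (2:Nat)^(k+1) = 2^k * 2 := by ring
        rw [h2] at hh
        omega
      have := ih (h/2) hlt
      rw [binDigits_pos h (by omega)]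
      show gBits k (h/2) ++ _ = _
      rw [this, List.length_append, List.length_cons, List.length_nil]
      rw [← List.append_assoc]
      congr 2
      congr 1
      omega

lemma fmt016b_eq (h : Nat) (hh : h < 2^16) :
    fmt016b (h : Int) = String.ofList (gBits 16 h) := by
  unfold fmt016b
  by_cases h0 : h = 0
  · subst h0
    simp [gBits_zero]
  · have : ((h : Int) == 0) = false := by simp; omega
    rw [this]
    simp only [Bool.false_eq_true, if_false, Int.toNat_natCast]
    rw [gBits_eq_pad 16 h hh]

-- ===== VERDICT (by name: the statement is the Claim_ definition above) =====
theorem int_to_dword_spec : Claim_equal_int_to_dword := by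
  intro x hdom
  unfold Spec_int_to_dword
  simp only [int_to_dword, int_to_dword_alt]
  have hdom' : -2147483648 ≤ x ∧ x ≤ 2147483648 := by
    simpa [pvDomInt, Dom_int_to_dword] using hdom
  set x1 := if x < 0 then x + 2^32 else x with hx1
  have hx1nn : 0 ≤ x1 := by rw [hx1]; split <;> omega
  have hx1lt : x1 < 2^32 := by rw [hx1]; split <;> omega
  set m := x1.toNat with hm
  have hcast : (m : Int) = x1 := Int.toNat_of_nonneg hx1nn
  have hmlt : m < 2^32 := by omega
  -- B's n equals A's adjusted x1
  have hn : PySem.Int.mod x (2^32) = (m : Int) := by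
    rw [PySem.Int.mod_eq_emod_of_pos (by norm_num), hcast, hx1]
    split <;> omega
  have hhi : PySem.Int.floordiv (m : Int) (2^16) = ((m / 2^16 : Nat) : Int) := by
    exact_mod_cast PySem.Int.floordiv_natCast m (2^16)
  have hlo : PySem.Int.mod (m : Int) (2^16) = ((m % 2^16 : Nat) : Int) := by
    exact_mod_cast PySem.Int.mod_natCast m (2^16)
  -- A's loop result
  have hloop := loopA 32 0 m []
  rw [hcast] at hloop
  rw [show (0:Int) + ((32:Nat):Int) = 32 from by norm_num] at hloop
  rw [hloop]
  have hsplit : gBits 32 m = gBits 16 (m / 2^16) ++ gBits 16 (m % 2^16) := gBits_add 16 16 m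
  have htake : PySem.List.slice (gBits 32 m ++ []) none (some 16) = gBits 16 (m / 2^16) := by
    rw [List.append_nil, PySem.List.slice_to _ (by norm_num), hsplit]
    show List.take (16:Int).toNat _ = _
    have h16 : ((16:Int)).toNat = (gBits 16 (m / 2^16)).length := by
      rw [gBits_length]; rfl
    rw [h16, List.take_left]
  have hdrop : PySem.List.slice (gBits 32 m ++ []) (some 16) none = gBits 16 (m % 2^16) := by
    rw [List.append_nil, PySem.List.slice_from _ (by norm_num), hsplit]
    show List.drop (16:Int).toNat _ = _
    have h16 : ((16:Int)).toNat = (gBits 16 (m / 2^16)).length := by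
      rw [gBits_length]; rfl
    rw [h16, List.drop_left]
  rw [htake, hdrop, hn, hhi, hlo]
  have hhiLt : m / 2^16 < 2^16 := by omega
  have hloLt : m % 2^16 < 2^16 := by omega
  rw [fmt016b_eq _ hhiLt, fmt016b_eq _ hloLt]
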